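-- pv_equiv track=rewrite | github.com/pratyush-ksingh/dsa-nova | step_16_dynamic_programming/16.3_2d_3d_dp_grids/P001_ninjas_training/solution.py | ninja_tab
-- ===== SOURCE A (Python) =====
-- from typing import List
--
-- def ninja_tab(points: List[List[int]]) -> int:
--     """Build dp table iteratively from day 0."""
--     n = len(points)
--     dp = [[0] * 4 for _ in range(n)]
--
--     # Base case: day 0
--     dp[0][0] = max(points[0][1], points[0][2])  # can't do activity 0
--     dp[0][1] = max(points[0][0], points[0][2])  # can't do activity 1
--     dp[0][2] = max(points[0][0], points[0][1])  # can't do activity 2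
--     dp[0][3] = max(points[0])                    # no restriction
--
--     for day in range(1, n):
--         for last in range(4):
--             dp[day][last] = 0
--             for j in range(3):
--                 if j != last:
--                     dp[day][last] = max(
--                         dp[day][last],
--                         points[day][j] + dp[day - 1][j]
--                     )
--
--     return dp[n - 1][3]
-- ===== SOURCE B (Python) =====
-- from typing import List
--
-- def ninja_tab(points: List[List[int]]) -> int:
--     """Top-down memoized recursion on (day, last); last == 3 means no restriction."""
--     n = len(points)
--     memo = {}
--
--     def f(day: int, last: int) -> int:
--         key = (day, last)
--         if key in memo:
--             return memo[key]
--         if day == 0: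
--             if last == 3:
--                 r = max(points[0])
--             else:
--                 r = max(points[0][j] for j in range(3) if j != last)
--         else:
--             r = 0
--             for j in range(3):
--                 if j != last:
--                     r = max(r, points[day][j] + f(day - 1, j))
--         memo[key] = r
--         return r
--
--     return f(n - 1, 3)
-- ===== Notes on version B (the rewrite author's own statement) =====
-- stated objective: alternative
-- what changed: Replaces the iterative full dp table build with a top-down memoized recursion f(day, last) on the same recurrence, returning f(n-1, 3).
import Mathlib
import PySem

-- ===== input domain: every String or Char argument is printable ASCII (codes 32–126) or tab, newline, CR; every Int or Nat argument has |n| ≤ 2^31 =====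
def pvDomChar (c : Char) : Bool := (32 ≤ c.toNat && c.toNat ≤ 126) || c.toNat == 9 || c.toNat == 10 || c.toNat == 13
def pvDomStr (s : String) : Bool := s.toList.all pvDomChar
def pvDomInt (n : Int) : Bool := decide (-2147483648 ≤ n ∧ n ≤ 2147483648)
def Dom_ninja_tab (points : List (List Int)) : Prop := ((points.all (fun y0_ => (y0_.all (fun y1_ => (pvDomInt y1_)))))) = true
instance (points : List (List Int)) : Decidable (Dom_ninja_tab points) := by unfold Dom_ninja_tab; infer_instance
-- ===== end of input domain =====

-- B replaces A's iterative dp-table build with a top-down (memoized in Python) recursion on (day, last); same values, same cost.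


-- points[d][j] with default 0; Pre_ keeps every index actually used in range.
def pget (points : List (List Int)) (d j : Int) : Int :=
  PySem.List.pyGetD (PySem.List.pyGetD points d []) j 0

-- ===== PORT A =====
-- literal port of A: build the dp table row by row (Python pre-allocates and mutates in order;
-- appending the finished row is the same table), then read dp[n-1][3].
def ninja_tab (points : List (List Int)) : Int :=
  let n : Int := points.length
  let row0 : List Int :=
    [ max (pget points 0 1) (pget points 0 2),
      max (pget points 0 0) (pget points 0 2),
      max (pget points 0 0) (pget points 0 1),
      (PySem.List.max? (PySem.List.pyGetD points 0 []) (fun x => x)).getD 0 ]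
  let dp := (PySem.List.pyRange 1 n 1).foldl (fun dp day =>
      dp ++ [(PySem.List.pyRange 0 4 1).foldl (fun row last =>
          row ++ [(PySem.List.pyRange 0 3 1).foldl (fun acc j =>
              if j ≠ last then
                max acc (pget points day j + PySem.List.pyGetD (PySem.List.pyGetD dp (day - 1) []) j 0)
              else acc) 0]) []]) [row0]
  PySem.List.pyGetD (PySem.List.pyGetD dp (n - 1) []) 3 0

-- ===== PORT B =====
-- literal port of Source B's recursion f(day, last) (the memo is a pure cache: identical values);
-- day is the structural Nat argument.
def ninjaF (points : List (List Int)) : Nat → Int → Int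
  | 0, last =>
      if last = 3 then (PySem.List.max? (PySem.List.pyGetD points 0 []) (fun x => x)).getD 0
      else (PySem.List.max?
              (((PySem.List.pyRange 0 3 1).filter (fun j => j ≠ last)).map (fun j => pget points 0 j))
              (fun x => x)).getD 0
  | d + 1, last =>
      (PySem.List.pyRange 0 3 1).foldl (fun r j =>
        if j ≠ last then max r (pget points ((d : Int) + 1) j + ninjaF points d j) else r) 0

def ninja_tab_alt (points : List (List Int)) : Int :=
  ninjaF points (points.length - 1) 3

-- ===== PRECONDITION & SPEC =====
-- exactly where Python A returns: a nonempty list whose rows all have length ≥ 3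
-- (A indexes points[0][1], points[0][2] and points[day][j] for j < 3, and max(points[0]) needs a row).
def Pre_ninja_tab (points : List (List Int)) : Prop :=
  points ≠ [] ∧ ∀ row ∈ points, 3 ≤ row.length
instance (points : List (List Int)) : Decidable (Pre_ninja_tab points) := by
  unfold Pre_ninja_tab; infer_instance

def pvWitness_ninja_tab : List (List Int) := [[1, 2, 3], [3, 1, 1]]

def Spec_ninja_tab (points : List (List Int)) (out : Int) : Prop := out = ninja_tab_alt points
instance (points : List (List Int)) (out : Int) : Decidable (Spec_ninja_tab points out) := by
  unfold Spec_ninja_tab; infer_instance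

-- ===== CLAIM (what is proved, stated in full; the proofs are below) =====
def Claim_equal_ninja_tab : Prop :=
  ∀ (points : List (List Int)), Dom_ninja_tab points → Pre_ninja_tab points →
    Spec_ninja_tab points (ninja_tab points)

-- ===== LEMMAS AND PROOFS =====

-- the row of B-values A's table holds at day d
def frow (points : List (List Int)) (d : Nat) : List Int :=
  [ninjaF points d 0, ninjaF points d 1, ninjaF points d 2, ninjaF points d 3]

theorem row0_eq (points : List (List Int)) :
    [ max (pget points 0 1) (pget points 0 2),
      max (pget points 0 0) (pget points 0 2),
      max (pget points 0 0) (pget points 0 1),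
      (PySem.List.max? (PySem.List.pyGetD points 0 []) (fun x => x)).getD 0 ] = frow points 0 := by
  have h3 : PySem.List.pyRange 0 3 1 = [0, 1, 2] := by decide
  simp [frow, ninjaF, h3, PySem.List.max?]
  refine ⟨?_, ?_, ?_⟩ <;> split <;> simp <;> omega

theorem fold_inv (points : List (List Int)) (k : Nat) :
    (PySem.List.pyRange 1 (1 + (k : Int)) 1).foldl (fun dp day =>
      dp ++ [(PySem.List.pyRange 0 4 1).foldl (fun row last =>
          row ++ [(PySem.List.pyRange 0 3 1).foldl (fun acc j =>
              if j ≠ last then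
                max acc (pget points day j + PySem.List.pyGetD (PySem.List.pyGetD dp (day - 1) []) j 0)
              else acc) 0]) []]) [frow points 0]
    = (List.range (k + 1)).map (frow points) := by
  induction k with
  | zero => simp [PySem.List.pyRange_one_eq_nil, frow]
  | succ m ih =>
    have hsplit : PySem.List.pyRange 1 (1 + ((m + 1 : Nat) : Int)) 1
        = PySem.List.pyRange 1 (1 + (m : Int)) 1 ++ [1 + (m : Int)] := by
      have : (1 : Int) + ((m + 1 : Nat) : Int) = (1 + (m : Int)) + 1 := by push_cast; ring
      rw [this, PySem.List.pyRange_one_succ_right (by omega)]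
    rw [hsplit, List.foldl_append, ih]
    have hc : (1 : Int) + (m : Int) = (m : Int) + 1 := by ring
    have h4 : PySem.List.pyRange 0 4 1 = [0, 1, 2, 3] := by decide
    have h3 : PySem.List.pyRange 0 3 1 = [0, 1, 2] := by decide
    simp only [List.foldl, h4, h3, hc]
    have hprev : PySem.List.pyGetD ((List.range (m + 1)).map (frow points)) ((m : Int) + 1 - 1) []
        = frow points m := by
      have h1 : ((m : Int) + 1) - 1 = ((m : Nat) : Int) := by ring
      rw [h1, PySem.List.pyGetD_natCast]
      simp
    rw [hprev]
    conv_rhs => rw [List.range_succ, List.map_append]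
    congr 1

-- ===== VERDICT (by name: the statement is the Claim_ definition above) =====
theorem ninja_tab_spec : Claim_equal_ninja_tab := by
  intro points _ hpre
  obtain ⟨hne, -⟩ := hpre
  obtain ⟨r, t, rfl⟩ : ∃ r t, points = r :: t := by
    cases points with
    | nil => exact absurd rfl hne
    | cons a b => exact ⟨a, b, rfl⟩
  unfold Spec_ninja_tab ninja_tab ninja_tab_alt
  simp only []
  have hn : (((r :: t).length : Nat) : Int) = 1 + (t.length : Int) := by
    simp [List.length_cons]; ring
  rw [hn, row0_eq, fold_inv]
  have hlen : (r :: t).length - 1 = t.length := by simp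
  rw [hlen]
  have h1 : (1 : Int) + (t.length : Int) - 1 = ((t.length : Nat) : Int) := by ring
  rw [h1, PySem.List.pyGetD_natCast]
  have hg : ((List.range (t.length + 1)).map (frow (r :: t))).getD t.length [] = frow (r :: t) t.length := by
    simp
  rw [hg]
  show PySem.List.pyGetD [ninjaF (r::t) t.length 0, ninjaF (r::t) t.length 1,
      ninjaF (r::t) t.length 2, ninjaF (r::t) t.length 3] 3 0 = ninjaF (r :: t) t.length 3
  simp [PySem.List.pyGetD, PySem.List.pyGet?, PySem.List.pyIdx?]
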